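-- pv_equiv track=rewrite | github.com/javisin22/asesin-ada | backend/bot/moveBot.py | acusacion
-- ===== SOURCE A (Python) =====
-- N_PLACES = 9
--
-- N_PEOPLE = 6
--
-- def acusacion(tarjeta):
-- 	info_place = False
-- 	info_who = False
-- 	info_weapon = False
--
-- 	MIN_INFO = 25
--
-- 	idx_place = -1
-- 	idx_who = -1
-- 	idx_weapon = -1
--
-- 	# Comprobar si se puede hacer una acusación
-- 	for i in range(len(tarjeta)):
-- 		if i < N_PLACES:
-- 			# Lugares
-- 			if sum(tarjeta[i]) <= MIN_INFO:
-- 				info_place = True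
-- 				idx_place = i
-- 		else:
-- 			if not info_place:
-- 				# No hay suficiente información para hacer una acusación
-- 				break
-- 			if i < N_PLACES+N_PEOPLE:
-- 				# Personas
-- 				if sum(tarjeta[i]) <= MIN_INFO:
-- 					info_who = True
-- 					idx_who = i
-- 			else:
-- 				if not (info_who and info_place):
-- 					# No hay suficiente información para hacer una acusación
-- 					break
-- 				# Armas
-- 				if sum(tarjeta[i]) <= MIN_INFO:
-- 					info_weapon = True
-- 					idx_weapon = i
--
-- 	return (info_place and info_who and info_weapon), idx_place, idx_who, idx_weapon
-- ===== SOURCE B (Python) =====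
-- N_PLACES = 9
--
-- N_PEOPLE = 6
--
-- def acusacion(tarjeta):
--     # one pass: the set of qualifying row indices; then pure selection on that set
--     qual = [i for i, row in enumerate(tarjeta) if sum(row) <= 25]
--     idx_place = max((i for i in qual if i < N_PLACES), default=-1)
--     idx_who = max((i for i in qual if N_PLACES <= i < N_PLACES + N_PEOPLE), default=-1) if idx_place >= 0 else -1
--     idx_weapon = max((i for i in qual if i >= N_PLACES + N_PEOPLE), default=-1) if idx_who >= 0 else -1
--     return idx_weapon >= 0, idx_place, idx_who, idx_weapon
-- ===== Notes on version B (the rewrite author's own statement) =====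
-- stated objective: alternative
-- what changed: A's single break-driven loop carrying three boolean flags is replaced by: one comprehension collecting the set of qualifying row indices (sum<=25), then three pure max-with-default selections over that index list (places/people/weapons) under short-circuiting guards.
import Mathlib
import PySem

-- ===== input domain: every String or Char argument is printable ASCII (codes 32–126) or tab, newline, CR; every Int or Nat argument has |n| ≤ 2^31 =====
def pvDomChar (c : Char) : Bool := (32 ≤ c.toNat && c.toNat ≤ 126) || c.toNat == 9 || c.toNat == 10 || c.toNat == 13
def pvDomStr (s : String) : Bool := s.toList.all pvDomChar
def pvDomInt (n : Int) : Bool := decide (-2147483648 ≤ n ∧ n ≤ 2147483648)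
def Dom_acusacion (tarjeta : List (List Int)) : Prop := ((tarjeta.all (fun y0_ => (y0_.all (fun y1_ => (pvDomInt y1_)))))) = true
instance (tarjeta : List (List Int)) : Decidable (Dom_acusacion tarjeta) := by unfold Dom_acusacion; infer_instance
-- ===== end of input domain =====

-- B replaces A's single break-driven flag-carrying loop by one comprehension that collects
-- the qualifying row indices, followed by three guarded max-with-default selections (alternative decomposition).

-- ===== PORT A =====
-- python's sum(row)
def pySumRow (row : List Int) : Int := row.foldl (· + ·) 0

-- 'for i in range(len(tarjeta)): … tarjeta[i] …' iterated as index/row pairs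
def enumFrom (k : Int) : List (List Int) → List (Int × List Int)
  | [] => []
  | r :: rs => (k, r) :: enumFrom (k + 1) rs

-- A's loop body; an early return models 'break' (the final return follows immediately)
def acusacionGo : List (Int × List Int) → Bool → Bool → Bool → Int → Int → Int → Bool × Int × Int × Int
  | [], ip, iw, iwe, p, w, we => (ip && iw && iwe, p, w, we)
  | (i, row) :: rest, ip, iw, iwe, p, w, we =>
    if i < 9 then
      if pySumRow row ≤ 25 then acusacionGo rest true iw iwe i w we
      else acusacionGo rest ip iw iwe p w we
    else if !ip then (ip && iw && iwe, p, w, we)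
    else if i < 15 then
      if pySumRow row ≤ 25 then acusacionGo rest ip true iwe p i we
      else acusacionGo rest ip iw iwe p w we
    else if !(iw && ip) then (ip && iw && iwe, p, w, we)
    else if pySumRow row ≤ 25 then acusacionGo rest ip iw true p w i
    else acusacionGo rest ip iw iwe p w we

def acusacion (tarjeta : List (List Int)) : Bool × Int × Int × Int :=
  acusacionGo (enumFrom 0 tarjeta) false false false (-1) (-1) (-1)

-- ===== PORT B =====
-- Source B: qual = [i for i, row in enumerate(tarjeta) if sum(row) <= 25], then three
-- max(..., default=-1) selections over qual under the short-circuiting guards.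
def acusacion_alt (tarjeta : List (List Int)) : Bool × Int × Int × Int :=
  let qual := ((PySem.List.enumerate tarjeta 0).filter (fun p => decide (pySumRow p.2 ≤ 25))).map Prod.fst
  let idx_place := (PySem.List.max? (qual.filter (fun i => decide (i < 9))) (fun x => x)).getD (-1)
  let idx_who := if idx_place ≥ 0 then
      (PySem.List.max? (qual.filter (fun i => decide (9 ≤ i ∧ i < 15))) (fun x => x)).getD (-1)
    else -1
  let idx_weapon := if idx_who ≥ 0 then
      (PySem.List.max? (qual.filter (fun i => decide (15 ≤ i))) (fun x => x)).getD (-1)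
    else -1
  (decide (idx_weapon ≥ 0), idx_place, idx_who, idx_weapon)

-- ===== PRECONDITION & SPEC =====
def Spec_acusacion (tarjeta : List (List Int)) (out : Bool × Int × Int × Int) : Prop := out = acusacion_alt tarjeta
instance (tarjeta : List (List Int)) (out : Bool × Int × Int × Int) : Decidable (Spec_acusacion tarjeta out) := by unfold Spec_acusacion; infer_instance

-- ===== CLAIM (what is proved, stated in full; the proofs are below) =====
def Claim_equal_acusacion : Prop := ∀ (tarjeta : List (List Int)), Dom_acusacion tarjeta → Spec_acusacion tarjeta (acusacion tarjeta)

-- ===== LEMMAS AND PROOFS =====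

-- the qualifying indices of the rows, starting at index k
def qf (k : Int) : List (List Int) → List Int
  | [] => []
  | r :: rs => if pySumRow r ≤ 25 then k :: qf (k + 1) rs else qf (k + 1) rs

-- a last-qualifying-index accumulator (proof tool relating both ports)
def altLast : Int → List (List Int) → Int → Int
  | _, [], best => best
  | i, r :: rs, best => altLast (i + 1) rs (if pySumRow r ≤ 25 then i else best)

lemma qual_eq : ∀ (t : List (List Int)) (k : Int),
    ((PySem.List.enumerate t k).filter (fun p => decide (pySumRow p.2 ≤ 25))).map Prod.fst = qf k t
  | [], k => by simp [qf, PySem.List.enumerate_nil]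
  | r :: rs, k => by
    simp only [PySem.List.enumerate_cons, List.filter_cons, qf]
    by_cases h : pySumRow r ≤ 25
    · simp [h, qual_eq rs (k + 1)]
    · simp [h, qual_eq rs (k + 1)]

lemma qf_append (xs : List (List Int)) : ∀ (k : Int) (ys : List (List Int)),
    qf k (xs ++ ys) = qf k xs ++ qf (k + xs.length) ys := by
  induction xs with
  | nil => intro k ys; simp [qf]
  | cons x xs ih =>
    intro k ys
    have h : k + ((x :: xs).length : Int) = (k + 1) + (xs.length : Int) := by
      simp only [List.length_cons]; push_cast; ring
    simp only [List.cons_append, qf, ih, h]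
    split <;> rfl

lemma qf_bounds : ∀ (seg : List (List Int)) (k i : Int), i ∈ qf k seg → k ≤ i ∧ i < k + seg.length
  | [], k, i, h => by simp [qf] at h
  | r :: rs, k, i, h => by
    simp only [qf] at h
    have step : i ∈ qf (k + 1) rs → k ≤ i ∧ i < k + (r :: rs).length := by
      intro hm
      have := qf_bounds rs (k + 1) i hm
      simp only [List.length_cons]; push_cast at this ⊢; omega
    by_cases hs : pySumRow r ≤ 25
    · rw [if_pos hs] at h
      rcases List.mem_cons.mp h with h | h
      · subst h; simp only [List.length_cons]; push_cast; omega
      · exact step h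
    · rw [if_neg hs] at h; exact step h

lemma foldl_max_qf : ∀ (seg : List (List Int)) (k b : Int), b < k →
    (qf k seg).foldl max b = altLast k seg b
  | [], _, _, _ => rfl
  | r :: rs, k, b, hb => by
    simp only [qf, altLast]
    by_cases hs : pySumRow r ≤ 25
    · simp only [if_pos hs, List.foldl_cons, max_eq_right (le_of_lt hb)]
      exact foldl_max_qf rs (k + 1) k (by omega)
    · simp only [if_neg hs]
      exact foldl_max_qf rs (k + 1) b (by omega)

lemma maxD_qf : ∀ (seg : List (List Int)) (k b : Int), b < k →
    (PySem.List.max? (qf k seg) (fun x => x)).getD b = altLast k seg b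
  | [], _, _, _ => rfl
  | r :: rs, k, b, hb => by
    simp only [qf, altLast]
    by_cases hs : pySumRow r ≤ 25
    · simp only [if_pos hs, PySem.List.max?_id_cons, Option.getD_some]
      exact foldl_max_qf rs (k + 1) k (by omega)
    · simp only [if_neg hs]
      exact maxD_qf rs (k + 1) b (by omega)

-- filter helpers: keep everything / drop everything
lemma filter_all_of (xs : List Int) (p : Int → Bool) (h : ∀ i ∈ xs, p i = true) : xs.filter p = xs :=
  List.filter_eq_self.mpr h

lemma filter_none_of (xs : List Int) (p : Int → Bool) (h : ∀ i ∈ xs, ¬ p i = true) : xs.filter p = [] :=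
  List.filter_eq_nil_iff.mpr h


lemma enumFrom_append (xs : List (List Int)) : ∀ (k : Int) (ys : List (List Int)),
    enumFrom k (xs ++ ys) = enumFrom k xs ++ enumFrom (k + xs.length) ys := by
  induction xs with
  | nil => intro k ys; simp [enumFrom]
  | cons x xs ih =>
    intro k ys
    have h : k + ((x :: xs).length : Int) = (k + 1) + (xs.length : Int) := by
      simp only [List.length_cons]; push_cast; ring
    simp only [List.cons_append, enumFrom, ih, h]

-- Phase 1 (places): the prefix of indices < 9 updates only (info_place, idx_place),
-- with info_place = decide (0 ≤ idx_place) as invariant.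
lemma phase1 : ∀ (seg : List (List Int)) (rest : List (Int × List Int)) (k p : Int)
    (ip iw iwe : Bool) (w we : Int), 0 ≤ k → k + seg.length ≤ 9 → ip = decide (0 ≤ p) →
    acusacionGo (enumFrom k seg ++ rest) ip iw iwe p w we
      = acusacionGo rest (decide (0 ≤ altLast k seg p)) iw iwe (altLast k seg p) w we
  | [], rest, k, p, ip, iw, iwe, w, we, _, _, hip => by
    subst hip; rfl
  | r :: rs, rest, k, p, ip, iw, iwe, w, we, hk, hb, hip => by
    have hk9 : k < 9 := by simp only [List.length_cons] at hb; omega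
    have hlen : (k + 1) + (rs.length : Int) ≤ 9 := by
      simp only [List.length_cons] at hb; push_cast at hb ⊢; omega
    simp only [enumFrom, List.cons_append, acusacionGo, if_pos hk9, altLast]
    by_cases hs : pySumRow r ≤ 25
    · simp only [if_pos hs]
      exact phase1 rs rest (k + 1) k true iw iwe w we (by omega) hlen (by simp [hk])
    · simp only [if_neg hs]
      exact phase1 rs rest (k + 1) p ip iw iwe w we (by omega) hlen hip

-- Phase 2 (people): indices in [9, 15) with info_place = true update (info_who, idx_who).
lemma phase2 : ∀ (seg : List (List Int)) (rest : List (Int × List Int)) (k w : Int)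
    (iw iwe : Bool) (p we : Int), 9 ≤ k → k + seg.length ≤ 15 → iw = decide (0 ≤ w) →
    acusacionGo (enumFrom k seg ++ rest) true iw iwe p w we
      = acusacionGo rest true (decide (0 ≤ altLast k seg w)) iwe p (altLast k seg w) we
  | [], rest, k, w, iw, iwe, p, we, _, _, hiw => by
    subst hiw; rfl
  | r :: rs, rest, k, w, iw, iwe, p, we, hk, hb, hiw => by
    have hk9 : ¬ k < 9 := by omega
    have hk15 : k < 15 := by simp only [List.length_cons] at hb; omega
    have hlen : (k + 1) + (rs.length : Int) ≤ 15 := by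
      simp only [List.length_cons] at hb; push_cast at hb ⊢; omega
    simp only [enumFrom, List.cons_append, acusacionGo, if_neg hk9, Bool.not_true,
      if_pos hk15, altLast, Bool.false_eq_true, if_false]
    by_cases hs : pySumRow r ≤ 25
    · simp only [if_pos hs]
      exact phase2 rs rest (k + 1) k true iwe p we (by omega) hlen (by simp; omega)
    · simp only [if_neg hs]
      exact phase2 rs rest (k + 1) w iw iwe p we (by omega) hlen hiw

-- Phase 3 (weapons): indices ≥ 15 with both earlier flags true update (info_weapon, idx_weapon).
lemma phase3 : ∀ (seg : List (List Int)) (k we : Int) (iwe : Bool) (p w : Int),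
    15 ≤ k → iwe = decide (0 ≤ we) →
    acusacionGo (enumFrom k seg) true true iwe p w we
      = (decide (0 ≤ altLast k seg we), p, w, altLast k seg we)
  | [], k, we, iwe, p, w, _, hiwe => by
    subst hiwe; rfl
  | r :: rs, k, we, iwe, p, w, hk, hiwe => by
    have hk9 : ¬ k < 9 := by omega
    have hk15 : ¬ k < 15 := by omega
    simp only [enumFrom, acusacionGo, if_neg hk9, Bool.not_true, if_neg hk15,
      Bool.and_self, altLast, Bool.false_eq_true, if_false]
    by_cases hs : pySumRow r ≤ 25
    · simp only [if_pos hs]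
      exact phase3 rs (k + 1) k true p w (by omega) (by simp; omega)
    · simp only [if_neg hs]
      exact phase3 rs (k + 1) we iwe p w (by omega) hiwe

-- B side: the three filters of the qualifying-index list are the section index lists.
lemma f1 (t : List (List Int)) :
    (qf 0 t).filter (fun i => decide (i < 9)) = qf 0 (t.take 9) := by
  conv_lhs => rw [← List.take_append_drop 9 t]
  rw [qf_append, List.filter_append]
  have h1 : (qf 0 (t.take 9)).filter (fun i => decide (i < 9)) = qf 0 (t.take 9) := by
    apply filter_all_of; intro i hi
    have hb := qf_bounds _ 0 i hi
    have hl : (t.take 9).length ≤ 9 := by simp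
    simp only [decide_eq_true_eq]; push_cast at hb; omega
  have h2 : (qf (0 + ((t.take 9).length : Int)) (t.drop 9)).filter (fun i => decide (i < 9)) = [] := by
    rcases hd : t.drop 9 with _ | ⟨r, rs⟩
    · simp [qf]
    · have hlen : (t.take 9).length = 9 := by
        have := congrArg List.length hd
        simp only [List.length_drop, List.length_cons] at this
        simp only [List.length_take]; omega
      apply filter_none_of; intro i hi
      have hb := qf_bounds _ _ i hi
      rw [hlen] at hb
      simp only [decide_eq_true_eq]; push_cast at hb; omega
  rw [h1, h2, List.append_nil]

lemma f2 (t : List (List Int)) :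
    (qf 0 t).filter (fun i => decide (9 ≤ i ∧ i < 15)) = qf 9 ((t.drop 9).take 6) := by
  conv_lhs => rw [← List.take_append_drop 9 t]
  rw [qf_append, List.filter_append]
  have h1 : (qf 0 (t.take 9)).filter (fun i => decide (9 ≤ i ∧ i < 15)) = [] := by
    apply filter_none_of; intro i hi
    have hb := qf_bounds _ 0 i hi
    have hl : (t.take 9).length ≤ 9 := by simp
    simp only [decide_eq_true_eq, not_and]; push_cast at hb; omega
  rw [h1, List.nil_append]
  rcases hd : t.drop 9 with _ | ⟨r, rs⟩
  · simp [qf]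
  · have hlen : (t.take 9).length = 9 := by
      have := congrArg List.length hd
      simp only [List.length_drop, List.length_cons] at this
      simp only [List.length_take]; omega
    rw [hlen, ← hd]
    have e9 : ((0 : Int) + ((9 : Nat) : Int)) = 9 := by norm_num
    rw [e9]
    conv_lhs => rw [← List.take_append_drop 6 (t.drop 9)]
    rw [qf_append, List.filter_append]
    have h2 : (qf 9 ((t.drop 9).take 6)).filter (fun i => decide (9 ≤ i ∧ i < 15)) = qf 9 ((t.drop 9).take 6) := by
      apply filter_all_of; intro i hi
      have hb := qf_bounds _ 9 i hi
      have hl : ((t.drop 9).take 6).length ≤ 6 := by simp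
      simp only [decide_eq_true_eq]; push_cast at hb; constructor <;> omega
    have h3 : (qf (9 + (((t.drop 9).take 6).length : Int)) ((t.drop 9).drop 6)).filter (fun i => decide (9 ≤ i ∧ i < 15)) = [] := by
      rcases hd2 : (t.drop 9).drop 6 with _ | ⟨r2, rs2⟩
      · simp [qf]
      · have hlen2 : ((t.drop 9).take 6).length = 6 := by
          have := congrArg List.length hd2
          simp only [List.length_drop, List.length_cons] at this
          simp only [List.length_take, List.length_drop]; omega
        apply filter_none_of; intro i hi
        have hb := qf_bounds _ _ i hi
        rw [hlen2] at hb
        simp only [decide_eq_true_eq, not_and]; push_cast at hb; omega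
    rw [h2, h3, List.append_nil]

lemma f3 (t : List (List Int)) :
    (qf 0 t).filter (fun i => decide (15 ≤ i)) = qf 15 (t.drop 15) := by
  conv_lhs => rw [← List.take_append_drop 15 t]
  rw [qf_append, List.filter_append]
  have h1 : (qf 0 (t.take 15)).filter (fun i => decide (15 ≤ i)) = [] := by
    apply filter_none_of; intro i hi
    have hb := qf_bounds _ 0 i hi
    have hl : (t.take 15).length ≤ 15 := by simp
    simp only [decide_eq_true_eq]; push_cast at hb; omega
  rw [h1, List.nil_append]
  rcases hd : t.drop 15 with _ | ⟨r, rs⟩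
  · simp [qf]
  · have hlen : (t.take 15).length = 15 := by
      have := congrArg List.length hd
      simp only [List.length_drop, List.length_cons] at this
      simp only [List.length_take]; omega
    rw [hlen, ← hd]
    have e15 : ((0 : Int) + ((15 : Nat) : Int)) = 15 := by norm_num
    rw [e15]
    apply filter_all_of; intro i hi
    have hb := qf_bounds _ 15 i hi
    simp only [decide_eq_true_eq]; omega

-- ===== VERDICT (by name: the statement is the Claim_ definition above) =====
theorem acusacion_spec : Claim_equal_acusacion := by
  unfold Claim_equal_acusacion Spec_acusacion
  intro t _
  -- rewrite B's port into altLast form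
  have hB : acusacion_alt t =
      (decide ((if (if altLast 0 (t.take 9) (-1) ≥ 0 then altLast 9 ((t.drop 9).take 6) (-1) else -1) ≥ 0
                then altLast 15 (t.drop 15) (-1) else -1) ≥ 0),
       altLast 0 (t.take 9) (-1),
       (if altLast 0 (t.take 9) (-1) ≥ 0 then altLast 9 ((t.drop 9).take 6) (-1) else -1),
       (if (if altLast 0 (t.take 9) (-1) ≥ 0 then altLast 9 ((t.drop 9).take 6) (-1) else -1) ≥ 0
                then altLast 15 (t.drop 15) (-1) else -1)) := by
    simp only [acusacion_alt, qual_eq, f1, f2, f3,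
      maxD_qf _ 0 (-1) (by norm_num), maxD_qf _ 9 (-1) (by norm_num),
      maxD_qf _ 15 (-1) (by norm_num)]
  rw [hB]
  set s1 := t.take 9 with hs1
  set s2 := (t.drop 9).take 6 with hs2
  set s3 := t.drop 15 with hs3
  have hd9 : s2 ++ s3 = t.drop 9 := by
    rw [hs2, hs3, show (15 : Nat) = 9 + 6 from rfl, ← List.drop_drop, List.take_append_drop]
  have hsplit : t = s1 ++ (s2 ++ s3) := by rw [hd9, hs1, List.take_append_drop]
  have h1len : (0 : Int) + s1.length ≤ 9 := by
    have : s1.length ≤ 9 := by simp [hs1]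
    omega
  have hA : acusacion t
      = acusacionGo (enumFrom ((0 : Int) + s1.length) (s2 ++ s3))
          (decide (0 ≤ altLast 0 s1 (-1))) false false (altLast 0 s1 (-1)) (-1) (-1) := by
    show acusacionGo (enumFrom 0 t) false false false (-1) (-1) (-1) = _
    conv_lhs => rw [hsplit, enumFrom_append]
    exact phase1 s1 _ 0 (-1) false false false (-1) (-1) le_rfl h1len (by decide)
  set p1 := altLast 0 s1 (-1) with hp1
  by_cases hp : p1 ≥ 0
  · -- place found
    have hflag : decide (0 ≤ p1) = true := by simp [ge_iff_le] at hp ⊢; omega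
    rw [hA, hflag]
    rcases h2c : s2 ++ s3 with _ | ⟨r, rs⟩
    · -- nothing after the places
      obtain ⟨hs2e, hs3e⟩ := List.append_eq_nil_iff.mp h2c
      simp [hs2e, enumFrom, acusacionGo, altLast, hp]
    · -- there is a people index, so the places section is full
      have hlen1 : s1.length = 9 := by
        have hlen9 := congrArg List.length (hd9.symm.trans h2c)
        simp only [List.length_drop, List.length_cons] at hlen9
        simp only [hs1, List.length_take]; omega
      have h2len : (9 : Int) + s2.length ≤ 15 := by
        have : s2.length ≤ 6 := by simp [hs2]
        omega
      rw [← h2c, hlen1, show ((0 : Int) + ((9 : Nat) : Int)) = 9 from by norm_num,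
        enumFrom_append,
        phase2 s2 _ 9 (-1) false false p1 (-1) (by norm_num) h2len (by decide)]
      set w1 := altLast 9 s2 (-1) with hw1
      by_cases hw : w1 ≥ 0
      · -- who found
        have hwflag : decide (0 ≤ w1) = true := by simp [ge_iff_le] at hw ⊢; omega
        rw [hwflag]
        rcases h3c : s3 with _ | ⟨r3, rs3⟩
        · simp [enumFrom, acusacionGo, altLast, hp, hw]
        · have hs2len : s2.length = 6 := by
            have h3len := congrArg List.length h3c
            simp only [hs3, List.length_drop, List.length_cons] at h3len
            simp only [hs2, List.length_take, List.length_drop]; omega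
          rw [hs2len, show ((9 : Int) + ((6 : Nat) : Int)) = 15 from by norm_num,
            phase3 (r3 :: rs3) 15 (-1) false p1 w1 (by norm_num) (by decide)]
          simp [hp, hw]
      · -- who not found: break at the first weapon index, or the loop just ends
        have hwflag : decide (0 ≤ w1) = false := by simp [ge_iff_le] at hw ⊢; omega
        rw [hwflag]
        rcases h3c : s3 with _ | ⟨r3, rs3⟩
        · simp [enumFrom, acusacionGo, hp, hw]
        · have hs2len : s2.length = 6 := by
            have h3len := congrArg List.length h3c
            simp only [hs3, List.length_drop, List.length_cons] at h3len
            simp only [hs2, List.length_take, List.length_drop]; omega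
          rw [hs2len, show ((9 : Int) + ((6 : Nat) : Int)) = 15 from by norm_num]
          simp only [enumFrom, acusacionGo]
          norm_num
          simp [hp, hw]
  · -- no place found: break at the first people index, or the loop just ends
    have hflag : decide (0 ≤ p1) = false := by simp [ge_iff_le] at hp ⊢; omega
    rw [hA, hflag]
    rcases h2c : s2 ++ s3 with _ | ⟨r, rs⟩
    · simp [enumFrom, acusacionGo, hp]
    · have hlen1 : s1.length = 9 := by
        have hlen9 := congrArg List.length (hd9.symm.trans h2c)
        simp only [List.length_drop, List.length_cons] at hlen9
        simp only [hs1, List.length_take]; omega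
      rw [hlen1, show ((0 : Int) + ((9 : Nat) : Int)) = 9 from by norm_num]
      simp only [enumFrom, acusacionGo]
      norm_num
      simp [hp]
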